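-- pv_equiv track=rewrite | github.com/anaottoni/funcoes_peg | funcoes_pandas.py | max_col
-- ===== SOURCE A (Python) =====
-- def shape(df):
--     """
--     Recebe uma matriz df e retorna uma tupla contendo suas dimensões no formato (numero_linhas, numero_colunas)
--     """
--     linhas =len(df)
--     if linhas != 0:
--         colunas =len(df[0])
--     else:
--         colunas = 0
--     return (linhas,colunas)
--
-- def max_col(df):
--     """
--     Recebe uma matriz df e retorna um vetor lista_max com n valores,
--     onde o i-esimo elemento de lista_max corresponde a maior valor da
--     i-esima coluna de df
--     """
--
--     lista_max = []
--
--     dimensao = shape(df)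
--
--     for j in range(dimensao[1]):
--         maior = df[0][j]
--         for i in range(dimensao[0]):
--             if df[i][j] > maior:
--                 maior = df[i][j]
--         lista_max.append(maior)
--
--     return lista_max
-- ===== SOURCE B (Python) =====
-- def max_col(df):
--     if not df:
--         return []
--     lista_max = list(df[0])
--     for row in df[1:]:
--         lista_max = [row[j] if row[j] > m else m for j, m in enumerate(lista_max)]
--     return lista_max
-- ===== Notes on version B (the rewrite author's own statement) =====
-- stated objective: alternative
-- what changed: Replaces A's column-outer/row-inner repeated vertical scans (with a shape() pre-pass) by a single row-major forward pass that keeps a running list of per-column maxima, updated pointwise for each subsequent row.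
import Mathlib
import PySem

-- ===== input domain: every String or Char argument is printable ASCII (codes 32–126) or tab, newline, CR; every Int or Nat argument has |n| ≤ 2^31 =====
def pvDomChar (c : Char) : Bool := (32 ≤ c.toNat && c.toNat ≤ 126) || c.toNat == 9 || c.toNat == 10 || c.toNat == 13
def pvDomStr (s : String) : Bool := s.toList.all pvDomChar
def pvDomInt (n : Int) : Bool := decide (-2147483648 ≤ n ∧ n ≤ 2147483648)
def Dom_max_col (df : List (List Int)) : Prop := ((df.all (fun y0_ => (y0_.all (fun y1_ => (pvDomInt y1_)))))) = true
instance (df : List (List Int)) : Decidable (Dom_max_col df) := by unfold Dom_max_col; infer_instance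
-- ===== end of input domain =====

-- B replaces A's column-outer/row-inner repeated vertical scans by a single row-major
-- pass maintaining a running list of per-column maxima (alternative decomposition, same cost).


-- ===== PORT A =====
-- df[i][j]; exact under Pre_max_col (every access in range there, so the getD defaults are never read)
def pvGetA (df : List (List Int)) (i j : Int) : Int :=
  PySem.List.pyGetD (PySem.List.pyGetD df i []) j 0

-- helper 'shape' of the module, transliterated
def pvShape (df : List (List Int)) : Int × Int :=
  let linhas : Int := (df.length : Int)
  let colunas : Int := if linhas ≠ 0 then ((df.headD []).length : Int) else 0
  (linhas, colunas)

def max_col (df : List (List Int)) : List Int :=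
  let dimensao := pvShape df
  (PySem.List.pyRange 0 dimensao.2 1).foldl (fun lista_max j =>
    let maior := pvGetA df 0 j
    let maior := (PySem.List.pyRange 0 dimensao.1 1).foldl (fun maior i =>
      if pvGetA df i j > maior then pvGetA df i j else maior) maior
    lista_max ++ [maior]) []

-- ===== PORT B =====
def max_col_alt (df : List (List Int)) : List Int :=
  match df with
  | [] => []
  | r0 :: rest =>
    rest.foldl (fun lista_max row =>
      (PySem.List.enumerate lista_max).map (fun jm =>
        -- row[j]; exact under Pre_max_col
        let v := PySem.List.pyGetD row jm.1 0
        if v > jm.2 then v else jm.2)) r0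

-- ===== PRECONDITION & SPEC =====
-- Pre_ excludes exactly the ragged matrices on which the Python A raises IndexError
-- (some row shorter than the first row); B raises there too.
def Pre_max_col (df : List (List Int)) : Prop :=
  ∀ row ∈ df, (df.headD []).length ≤ row.length
instance (df : List (List Int)) : Decidable (Pre_max_col df) := by unfold Pre_max_col; infer_instance

def pvWitness_max_col : List (List Int) := [[1, 2], [3, 0]]

def Spec_max_col (df : List (List Int)) (out : List Int) : Prop := out = max_col_alt df
instance (df : List (List Int)) (out : List Int) : Decidable (Spec_max_col df out) := by unfold Spec_max_col; infer_instance

-- ===== CLAIM (what is proved, stated in full; the proofs are below) =====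
def Claim_equal_max_col : Prop := ∀ (df : List (List Int)), Dom_max_col df → Pre_max_col df → Spec_max_col df (max_col df)

-- ===== LEMMAS AND PROOFS =====

-- the per-column step both programs perform for one row
def pvStep (j : Int) (maior : Int) (row : List Int) : Int :=
  if PySem.List.pyGetD row j 0 > maior then PySem.List.pyGetD row j 0 else maior

lemma enum_map_range (g : Int → Int) :
    ∀ (n : Nat) (a : Int),
      PySem.List.enumerate ((PySem.List.pyRange a (a + n) 1).map g) a
        = (PySem.List.pyRange a (a + n) 1).map (fun j => (j, g j)) := by
  intro n
  induction n with
  | zero => intro a; simp [PySem.List.pyRange_one_eq_nil]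
  | succ k ih =>
    intro a
    rw [PySem.List.pyRange_one_cons (by omega)]
    have h1 : a + 1 + (k : Int) = a + (k + 1 : Nat) := by push_cast; ring
    simp only [List.map_cons, PySem.List.enumerate_cons]
    rw [show ((a : Int) + (k + 1 : Nat)) = a + 1 + (k : Int) by push_cast; ring]
    rw [ih (a + 1)]

-- one B-row-step on a range-shaped accumulator acts pointwise
lemma b_row_step (c : Int) (hc : 0 ≤ c) (g : Int → Int) (row : List Int) :
    (PySem.List.enumerate ((PySem.List.pyRange 0 c 1).map g)).map (fun jm =>
        let v := PySem.List.pyGetD row jm.1 0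
        if v > jm.2 then v else jm.2)
      = (PySem.List.pyRange 0 c 1).map (fun j => pvStep j (g j) row) := by
  have h := enum_map_range g c.toNat 0
  rw [show (0 : Int) + (c.toNat : Int) = c by omega] at h
  rw [h, List.map_map]
  rfl

-- B's whole fold on a range-shaped accumulator is column-wise folds
lemma b_fold (c : Int) (hc : 0 ≤ c) (rest : List (List Int)) :
    ∀ (g : Int → Int),
      rest.foldl (fun lista_max row =>
          (PySem.List.enumerate lista_max).map (fun jm =>
            let v := PySem.List.pyGetD row jm.1 0
            if v > jm.2 then v else jm.2)) ((PySem.List.pyRange 0 c 1).map g)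
        = (PySem.List.pyRange 0 c 1).map (fun j => rest.foldl (pvStep j) (g j)) := by
  induction rest with
  | nil => intro g; simp
  | cons row rest ih =>
    intro g
    rw [List.foldl_cons, b_row_step c hc g row, ih (fun j => pvStep j (g j) row)]
    simp [List.foldl_cons]

-- ===== VERDICT (by name: the statement is the Claim_ definition above) =====
theorem max_col_spec : Claim_equal_max_col := by
  intro df _hdom _hpre
  unfold Spec_max_col
  match df with
  | [] => rfl
  | r0 :: rest =>
    unfold max_col max_col_alt pvShape
    simp only [List.headD_cons]
    rw [if_pos (Int.natCast_ne_zero.mpr (by simp) : ((r0 :: rest).length : Int) ≠ 0)]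
    rw [PySem.List.foldl_append_singleton_eq_map]
    -- A's inner loop over row indices is a fold over the rows themselves
    have hA : ∀ j : Int,
        (PySem.List.pyRange 0 (((r0 :: rest).length : Nat) : Int) 1).foldl (fun maior i =>
            if pvGetA (r0 :: rest) i j > maior then pvGetA (r0 :: rest) i j else maior)
          (pvGetA (r0 :: rest) 0 j)
        = rest.foldl (pvStep j) (PySem.List.pyGetD r0 j 0) := by
      intro j
      have := PySem.List.foldl_pyRange_zero_pyGetD' (r0 :: rest) ([] : List Int)
        (fun maior row => pvStep j maior row) (pvGetA (r0 :: rest) 0 j)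
      simp only [pvGetA, pvStep] at this ⊢
      rw [this]
      have h0 : PySem.List.pyGetD (r0 :: rest) (0 : Int) [] = r0 := by
        simp [PySem.List.pyGetD, PySem.List.pyGet?, PySem.List.pyIdx?]
      rw [List.foldl_cons, h0]
      unfold pvStep
      simp
    -- B's start r0 is the range-shaped list of its own entries
    have hB : r0 = (PySem.List.pyRange 0 ((r0.length : Nat) : Int) 1).map
        (fun j => PySem.List.pyGetD r0 j 0) := by
      exact (PySem.List.map_pyGetD_pyRange_zero r0 0).symm
    conv_rhs => rw [hB]
    rw [b_fold ((r0.length : Nat) : Int) (by positivity) rest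
      (fun j => PySem.List.pyGetD r0 j 0)]
    exact List.map_congr_left (fun j _ => hA j)
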